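-- pv_equiv track=rewrite | github.com/alexandraback/datacollection | solutions_5639104758808576_0/Python/waitingkuo0527/main.py | solve
-- ===== SOURCE A (Python) =====
-- def solve(Smax, S):
--     """ solve the problem """
--
--     friends = 0
--     stands = 0
--     for level, si in enumerate(S):
--         if stands < level:
--             friends += level - stands
--             stands = level + si
--         else:
--             stands += si
--
--
--     return  friends
-- ===== SOURCE B (Python) =====
-- def solve(Smax, S):
--     """ solve the problem """
--     # Staged: build prefix sums, list all deficits level - prefix, take the maximum.
--     prefixes = [0]
--     for si in S:
--         prefixes.append(prefixes[-1] + si)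
--     deficits = [i - prefixes[i] for i in range(len(S))]
--     return max(deficits) if deficits else 0
-- ===== Notes on version B (the rewrite author's own statement) =====
-- stated objective: alternative
-- what changed: B replaces A's single greedy pass (friends folded into a mutable 'stands' state via an if/else) by three staged passes: build the prefix-sum list of S, list every deficit level - prefix, and return the maximum (0 when S is empty).
import Mathlib
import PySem

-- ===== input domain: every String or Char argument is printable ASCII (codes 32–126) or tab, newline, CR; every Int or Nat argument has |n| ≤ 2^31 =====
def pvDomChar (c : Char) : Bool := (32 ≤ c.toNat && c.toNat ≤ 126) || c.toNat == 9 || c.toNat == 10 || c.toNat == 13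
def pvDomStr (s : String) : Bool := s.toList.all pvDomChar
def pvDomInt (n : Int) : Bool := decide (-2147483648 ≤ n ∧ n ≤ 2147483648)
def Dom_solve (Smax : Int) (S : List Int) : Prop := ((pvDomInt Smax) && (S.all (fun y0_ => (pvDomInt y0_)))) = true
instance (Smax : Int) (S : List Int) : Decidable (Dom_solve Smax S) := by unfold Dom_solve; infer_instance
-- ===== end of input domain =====

-- B replaces A's single greedy pass (friends folded into 'stands' via an if/else) by staged
-- passes: prefix-sum list, deficit list, maximum; same cost, different decomposition.


-- ===== PORT A =====
-- loop over 'for level, si in enumerate(S)' with state (friends, stands)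
def solveLoopA (level friends stands : Int) : List Int → Int
  | [] => friends
  | si :: rest =>
    if stands < level then
      solveLoopA (level + 1) (friends + (level - stands)) (level + si) rest
    else
      solveLoopA (level + 1) friends (stands + si) rest

def solve (Smax : Int) (S : List Int) : Int := solveLoopA 0 0 0 S

-- ===== PORT B =====
-- the prefix-building loop: 'prefixes = [0]; for si in S: prefixes.append(prefixes[-1] + si)'
-- transcribed carrying the running last element
def prefixesFrom (cur : Int) : List Int → List Int
  | [] => [cur]
  | si :: rest => cur :: prefixesFrom (cur + si) rest

-- 'max(deficits) if deficits else 0'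
def pyMax0 : List Int → Int
  | [] => 0
  | h :: t => t.foldl max h

def solve_alt (Smax : Int) (S : List Int) : Int :=
  let prefixes := prefixesFrom 0 S
  -- the comprehension's index i is always in range, so getD is exact here
  let deficits := (List.range S.length).map (fun (i : Nat) => (i : Int) - prefixes.getD i 0)
  pyMax0 deficits

-- ===== PRECONDITION & SPEC =====
def Spec_solve (Smax : Int) (S : List Int) (out : Int) : Prop := out = solve_alt Smax S
instance (Smax : Int) (S : List Int) (out : Int) : Decidable (Spec_solve Smax S out) := by unfold Spec_solve; infer_instance

-- ===== CLAIM (what is proved, stated in full; the proofs are below) =====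
def Claim_equal_solve : Prop := ∀ (Smax : Int) (S : List Int), Dom_solve Smax S → Spec_solve Smax S (solve Smax S)

-- ===== LEMMAS AND PROOFS =====
-- Proof helpers: a running-max formulation and the recursive deficit list.
def mrun (level standing friends : Int) : List Int → Int
  | [] => friends
  | si :: rest => mrun (level + 1) (standing + si) (max friends (level - standing)) rest

def deficitsList (level standing : Int) : List Int → List Int
  | [] => []
  | si :: rest => (level - standing) :: deficitsList (level + 1) (standing + si) rest

-- Invariant: A's stands equals the pure prefix sum plus the friends already counted.
theorem loopA_eq_mrun (S : List Int) : ∀ (level f st : Int), 0 ≤ f →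
    solveLoopA level f st S = mrun level (st - f) f S := by
  induction S with
  | nil => intro level f st hf; rfl
  | cons si rest ih =>
    intro level f st hf
    by_cases h : st < level
    · have e1 : solveLoopA level f st (si :: rest)
          = solveLoopA (level + 1) (f + (level - st)) (level + si) rest := by
        simp [solveLoopA, h]
      have e2 : mrun level (st - f) f (si :: rest)
          = mrun (level + 1) (st - f + si) (f + (level - st)) rest := by
        have hm : max f (level - (st - f)) = f + (level - st) := by omega
        simp [mrun, hm]
      rw [e1, e2, ih (level + 1) (f + (level - st)) (level + si) (by omega)]
      congr 1 <;> omega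
    · have e1 : solveLoopA level f st (si :: rest)
          = solveLoopA (level + 1) f (st + si) rest := by
        simp [solveLoopA, h]
      have e2 : mrun level (st - f) f (si :: rest)
          = mrun (level + 1) (st - f + si) f rest := by
        have hm : max f (level - (st - f)) = f := by omega
        simp [mrun, hm]
      rw [e1, e2, ih (level + 1) f (st + si) hf]
      congr 1
      omega

-- The running max is the fold of max over the deficit list.
theorem mrun_eq_foldl (S : List Int) : ∀ (level st f : Int),
    mrun level st f S = (deficitsList level st S).foldl max f := by
  induction S with
  | nil => intro level st f; rfl
  | cons si rest ih =>
    intro level st f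
    simp [mrun, deficitsList, List.foldl, ih]

-- The recursive deficit list equals B's comprehension over the prefix list.
theorem deficitsList_eq_map (S : List Int) : ∀ (level st a : Int),
    deficitsList level (st + a) S
      = (List.range S.length).map (fun (i : Nat) => (level + (i : Int)) - (st + (prefixesFrom a S).getD i 0)) := by
  induction S with
  | nil => intro level st a; simp [deficitsList]
  | cons si rest ih =>
    intro level st a
    have hst : st + a + si = st + (a + si) := by ring
    simp only [deficitsList, hst, ih (level + 1) st (a + si), List.length_cons,
      List.range_succ_eq_map, List.map_cons, List.map_map, prefixesFrom]
    congr 1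
    · simp
    · apply List.map_congr_left
      intro i _
      simp [Function.comp]
      push_cast
      ring_nf

-- ===== VERDICT (by name: the statement is the Claim_ definition above) =====
theorem solve_spec : Claim_equal_solve := by
  intro Smax S _
  unfold Spec_solve solve solve_alt
  rw [loopA_eq_mrun S 0 0 0 (le_refl 0), mrun_eq_foldl]
  simp only [show (0:Int) - 0 = 0 from rfl]
  have hd : deficitsList 0 0 S
      = (List.range S.length).map (fun (i : Nat) => (i : Int) - (prefixesFrom 0 S).getD i 0) := by
    have := deficitsList_eq_map S 0 0 0
    simpa using this
  rw [hd]
  cases S with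
  | nil => rfl
  | cons s r =>
    simp only [List.length_cons, List.range_succ_eq_map, List.map_cons, pyMax0]
    simp [prefixesFrom, List.foldl]
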